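-- pv_equiv track=rewrite | github.com/wngpublic/pythontest | testcases.py | getPathAndFile
-- ===== SOURCE A (Python) =====
-- def getPathAndFile(filename):
--     ary  = filename.split('/')
--     if len(ary) == 1:
--         path = None
--         file = ary[0]
--     else:
--         path = None
--         for i in range(0, len(ary)-1):
--             if path is None:
--                 path = ary[i]
--             else:
--                 path = path + '/' + ary[i]
--         file = ary[len(ary)-1]
--     result = {'path':path, 'file':file}
--     return result
-- ===== SOURCE B (Python) =====
-- def getPathAndFile(filename):
--     idx = filename.rfind('/')
--     if idx == -1:
--         return {'path': None, 'file': filename}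
--     return {'path': filename[:idx], 'file': filename[idx + 1:]}
-- ===== Notes on version B (the rewrite author's own statement) =====
-- stated objective: simpler
-- what changed: B locates the last separator with rfind and returns two slices, instead of splitting into a list and rebuilding the directory part with a concatenation loop.
import Mathlib
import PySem

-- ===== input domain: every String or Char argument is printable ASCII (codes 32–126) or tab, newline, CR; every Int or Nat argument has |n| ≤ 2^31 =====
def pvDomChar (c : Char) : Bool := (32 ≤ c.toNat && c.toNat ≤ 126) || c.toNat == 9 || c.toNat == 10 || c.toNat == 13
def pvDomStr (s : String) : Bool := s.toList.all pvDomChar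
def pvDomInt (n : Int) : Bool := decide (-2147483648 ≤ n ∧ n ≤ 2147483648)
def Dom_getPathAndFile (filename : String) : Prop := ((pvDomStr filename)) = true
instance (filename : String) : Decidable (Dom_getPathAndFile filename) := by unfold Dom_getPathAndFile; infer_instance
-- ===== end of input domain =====

-- B locates the last '/' with rfind and returns two slices instead of splitting into a list and rebuilding the directory part with a concatenation loop; equal return values, simpler code.

-- ===== PORT A =====
def getPathAndFile (filename : String) : List (String × Option String) :=
  -- ary = filename.split('/'); the separator is nonempty, so split? is always `some` (the getD [] branch is unreachable)
  let ary : List String := (PySem.Str.split? filename "/").getD []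
  if ary.length == 1 then
    [("path", (none : Option String)), ("file", some (PySem.List.pyGetD ary 0 ""))]
  else
    let path : Option String :=
      (PySem.List.pyRange 0 ((ary.length : Int) - 1) 1).foldl
        (fun path i =>
          match path with
          | none => some (PySem.List.pyGetD ary i "")
          | some p => some (p ++ "/" ++ PySem.List.pyGetD ary i "")) none
    [("path", path), ("file", some (PySem.List.pyGetD ary ((ary.length : Int) - 1) ""))]

-- ===== PORT B =====
def getPathAndFile_alt (filename : String) : List (String × Option String) :=
  let idx : Int := PySem.Str.rfind filename "/"
  if idx == -1 then
    [("path", (none : Option String)), ("file", some filename)]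
  else
    [("path", some (PySem.Str.slice filename none (some idx))),
     ("file", some (PySem.Str.slice filename (some (idx + 1)) none))]

-- ===== PRECONDITION & SPEC =====
def Spec_getPathAndFile (filename : String) (out : List (String × Option String)) : Prop := out = getPathAndFile_alt filename
instance (filename : String) (out : List (String × Option String)) : Decidable (Spec_getPathAndFile filename out) := by unfold Spec_getPathAndFile; infer_instance

-- ===== CLAIM (what is proved, stated in full; the proofs are below) =====
def Claim_equal_getPathAndFile : Prop := ∀ (filename : String), Dom_getPathAndFile filename → Spec_getPathAndFile filename (getPathAndFile filename)

-- ===== LEMMAS AND PROOFS =====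

-- structural version of str.split('/') (single-character separator)
def splitOnP : List Char → List (List Char)
  | [] => [[]]
  | c :: r =>
    if c = '/' then [] :: splitOnP r
    else
      match splitOnP r with
      | [] => [[c]]
      | h :: t => (c :: h) :: t

lemma splitOnP_ne_nil (cs : List Char) : splitOnP cs ≠ [] := by
  induction cs with
  | nil => simp [splitOnP]
  | cons c r ih =>
    simp only [splitOnP]
    split
    · simp
    · split
      · simp
      · simp

lemma splitOn_go_spec (fuel : Nat) (l cur : List Char) (acc : List (List Char))
    (h : l.length < fuel) :
    PySem.Chars.splitOn.go ['/'] fuel l cur acc =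
      acc.reverse ++ (match splitOnP l with
        | [] => []
        | hd :: t => (cur.reverse ++ hd) :: t) := by
  induction fuel generalizing l cur acc with
  | zero => omega
  | succ f ih =>
    cases l with
    | nil => simp [PySem.Chars.splitOn.go, splitOnP]
    | cons c rest =>
      by_cases hc : c = '/'
      · subst hc
        rw [PySem.Chars.splitOn.go]
        have hpre : List.isPrefixOf ['/'] ('/' :: rest) = true := by simp [List.isPrefixOf]
        simp only [hpre, if_pos, List.length_cons, List.length_nil, List.drop_succ_cons,
          List.drop_zero]
        rw [ih rest [] (cur.reverse :: acc) (by simp at h ⊢; omega)]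
        obtain ⟨hd, t, hs⟩ : ∃ hd t, splitOnP rest = hd :: t := by
          cases hs : splitOnP rest with
          | nil => exact absurd hs (splitOnP_ne_nil rest)
          | cons a b => exact ⟨a, b, rfl⟩
        simp [splitOnP, hs]
      · rw [PySem.Chars.splitOn.go]
        have hpre : List.isPrefixOf ['/'] (c :: rest) = false := by
          simp [List.isPrefixOf]; exact fun hh => absurd hh.symm hc
        simp only [hpre, Bool.false_eq_true, if_false]
        rw [ih rest (c :: cur) acc (by simp at h ⊢; omega)]
        obtain ⟨hd, t, hs⟩ : ∃ hd t, splitOnP rest = hd :: t := by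
          cases hs : splitOnP rest with
          | nil => exact absurd hs (splitOnP_ne_nil rest)
          | cons a b => exact ⟨a, b, rfl⟩
        simp [splitOnP, if_neg hc, hs]

lemma splitOn_eq_splitOnP (cs : List Char) :
    PySem.Chars.splitOn cs ['/'] = splitOnP cs := by
  rw [PySem.Chars.splitOn, splitOn_go_spec _ _ _ _ (by omega)]
  obtain ⟨hd, t, hs⟩ : ∃ hd t, splitOnP cs = hd :: t := by
    cases hs : splitOnP cs with
    | nil => exact absurd hs (splitOnP_ne_nil cs)
    | cons a b => exact ⟨a, b, rfl⟩
  simp [hs]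

lemma splitOnP_noslash (cs : List Char) (h : '/' ∉ cs) : splitOnP cs = [cs] := by
  induction cs with
  | nil => rfl
  | cons c r ih =>
    simp only [List.mem_cons, not_or] at h
    simp only [splitOnP, if_neg (Ne.symm h.1), ih h.2]

-- decomposition of the split at the last '/'
lemma splitOnP_slash (cs : List Char) (h : '/' ∈ cs) :
    ∃ dl lastp, splitOnP cs = dl ++ [lastp] ∧ dl ≠ [] ∧ '/' ∉ lastp ∧
      cs = PySem.Chars.join ['/'] dl ++ '/' :: lastp := by
  induction cs with
  | nil => simp at h
  | cons c r ih =>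
    by_cases hc : c = '/'
    · subst hc
      by_cases hr : '/' ∈ r
      · obtain ⟨dl, lastp, h1, h2, h3, h4⟩ := ih hr
        refine ⟨[] :: dl, lastp, by simp [splitOnP, h1], by simp, h3, ?_⟩
        obtain ⟨d0, dt, rfl⟩ : ∃ d0 dt, dl = d0 :: dt := by
          cases dl with | nil => exact absurd rfl h2 | cons a b => exact ⟨a, b, rfl⟩
        rw [PySem.Chars.join_cons_cons]
        simp [h4]
      · refine ⟨[[]], r, by simp [splitOnP, splitOnP_noslash r hr], by simp, hr, ?_⟩
        simp [PySem.Chars.join_singleton]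
    · have hr : '/' ∈ r := by
        rcases List.mem_cons.mp h with h' | h'
        · exact absurd h'.symm hc
        · exact h'
      obtain ⟨dl, lastp, h1, h2, h3, h4⟩ := ih hr
      obtain ⟨d0, dt, rfl⟩ : ∃ d0 dt, dl = d0 :: dt := by
        cases dl with | nil => exact absurd rfl h2 | cons a b => exact ⟨a, b, rfl⟩
      refine ⟨(c :: d0) :: dt, lastp, ?_, by simp, h3, ?_⟩
      · simp only [splitOnP, if_neg hc, h1]
        simp
      · have hj : PySem.Chars.join ['/'] ((c :: d0) :: dt) = c :: PySem.Chars.join ['/'] (d0 :: dt) := by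
          cases dt with
          | nil => simp [PySem.Chars.join_singleton]
          | cons q t => rw [PySem.Chars.join_cons_cons, PySem.Chars.join_cons_cons]; simp
        rw [hj]
        simp [h4]

lemma isPrefixOf_slash (l : List Char) : ['/'].isPrefixOf l = true ↔ l[0]? = some '/' := by
  cases l with
  | nil => decide
  | cons a b =>
    rw [List.isPrefixOf_iff_prefix]
    simp only [List.getElem?_cons_zero, Option.some.injEq]
    constructor
    · intro hh
      exact ((List.cons_prefix_cons.mp hh).1).symm
    · intro hh
      subst hh
      exact List.cons_prefix_cons.mpr ⟨rfl, List.nil_prefix⟩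

lemma rfind_go_noslash (s : List Char) (h : '/' ∉ s) (j : Nat) :
    PySem.Chars.rfind.go s ['/'] j = -1 := by
  induction j with
  | zero =>
    rw [PySem.Chars.rfind.go]
    have : ¬ (['/'].isPrefixOf s = true) := by
      rw [isPrefixOf_slash]
      intro hh
      exact h (List.mem_of_getElem? hh)
    simp [this]
  | succ j ih =>
    rw [PySem.Chars.rfind.go]
    have : ¬ (['/'].isPrefixOf (List.drop (j + 1) s) = true) := by
      rw [isPrefixOf_slash]
      intro hh
      exact h (List.mem_of_mem_drop (List.mem_of_getElem? hh))
    simp [this, ih]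

lemma rfind_go_slash (u v : List Char) (hv : '/' ∉ v) (j : Nat) (hj : u.length ≤ j) :
    PySem.Chars.rfind.go (u ++ '/' :: v) ['/'] j = (u.length : Int) := by
  induction j with
  | zero =>
    have hu : u = [] := by
      cases u with
      | nil => rfl
      | cons a b => simp at hj
    subst hu
    rw [PySem.Chars.rfind.go]
    simp
  | succ j ih =>
    rw [PySem.Chars.rfind.go]
    by_cases he : j + 1 = u.length
    · have : List.drop (j + 1) (u ++ '/' :: v) = '/' :: v := by
        rw [he, List.drop_left]
      simp [he]
    · have hlt : u.length ≤ j := by omega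
      have hnp : ¬ (['/'].isPrefixOf (List.drop (j + 1) (u ++ '/' :: v)) = true) := by
        rw [isPrefixOf_slash]
        intro hh
        have h0 : (List.drop (j + 1) (u ++ '/' :: v))[0]? = (u ++ '/' :: v)[j + 1]? := by
          simp [List.getElem?_drop]
        rw [h0] at hh
        rw [List.getElem?_append_right (by omega)] at hh
        have h1 : ('/' :: v)[j + 1 - u.length]? = v[j - u.length]? := by
          have : j + 1 - u.length = (j - u.length) + 1 := by omega
          simp [this]
        rw [h1] at hh
        exact hv (List.mem_of_getElem? hh)
      simp only [hnp, Bool.false_eq_true, if_false]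
      exact ih hlt

lemma ofList_append_ofList (a b : List Char) :
    String.ofList a ++ String.ofList b = String.ofList (a ++ b) := by
  apply String.toList_inj.mp
  simp

lemma slash_str : ("/" : String) = String.ofList ['/'] := by decide

lemma join_eq_flatMap (h : List Char) (t : List (List Char)) :
    PySem.Chars.join ['/'] (h :: t) = h ++ t.flatMap (fun d => '/' :: d) := by
  induction t generalizing h with
  | nil => simp [PySem.Chars.join_singleton]
  | cons q r ih =>
    rw [PySem.Chars.join_cons_cons, ih q]
    simp

lemma fold_join_aux (dl : List (List Char)) (acc : List Char) :
    (dl.map String.ofList).foldl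
      (fun path x =>
        match path with
        | none => some x
        | some p => some (p ++ "/" ++ x)) (some (String.ofList acc))
      = some (String.ofList (acc ++ dl.flatMap (fun d => '/' :: d))) := by
  induction dl generalizing acc with
  | nil => simp
  | cons d t ih =>
    simp only [List.map_cons, List.foldl_cons]
    rw [show (String.ofList acc ++ "/" ++ String.ofList d) = String.ofList (acc ++ '/' :: d) by
      rw [slash_str, ofList_append_ofList, ofList_append_ofList]; simp]
    rw [ih (acc ++ '/' :: d)]
    simp

-- A's concatenation loop over a list of pieces is '/'-joining
lemma fold_join (dl : List (List Char)) (hdl : dl ≠ []) :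
    (dl.map String.ofList).foldl
      (fun path x =>
        match path with
        | none => some x
        | some p => some (p ++ "/" ++ x)) none
      = some (String.ofList (PySem.Chars.join ['/'] dl)) := by
  cases dl with
  | nil => exact absurd rfl hdl
  | cons h t =>
    simp only [List.map_cons, List.foldl_cons]
    rw [fold_join_aux t h, join_eq_flatMap]

lemma split_eval (filename : String) :
    (PySem.Str.split? filename "/").getD [] = (splitOnP filename.toList).map String.ofList := by
  rw [PySem.Str.split?]
  have hsep : ("/" : String).toList = ['/'] := by decide
  rw [hsep, PySem.Chars.split?]
  simp [splitOn_eq_splitOnP]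

lemma rfind_eval (filename : String) :
    PySem.Str.rfind filename "/" = PySem.Chars.rfind.go filename.toList ['/'] filename.toList.length := by
  rw [PySem.Str.rfind]
  have hsep : ("/" : String).toList = ['/'] := by decide
  rw [hsep, PySem.Chars.rfind]

-- ===== VERDICT (by name: the statement is the Claim_ definition above) =====
theorem getPathAndFile_spec : Claim_equal_getPathAndFile := by
  intro filename _
  unfold Spec_getPathAndFile getPathAndFile getPathAndFile_alt
  simp only [split_eval, rfind_eval]
  by_cases h : '/' ∈ filename.toList
  · obtain ⟨dl, lastp, h1, h2, h3, h4⟩ := splitOnP_slash filename.toList h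
    have hJlen : (PySem.Chars.join ['/'] dl).length ≤ filename.toList.length := by
      rw [h4]; simp
    rw [h1]
    rw [show filename.toList = PySem.Chars.join ['/'] dl ++ '/' :: lastp from h4,
      rfind_go_slash _ _ h3 _ (by rw [← h4]; exact hJlen)]
    obtain ⟨d0, dt, rfl⟩ : ∃ d0 dt, dl = d0 :: dt := by
      cases dl with | nil => exact absurd rfl h2 | cons a b => exact ⟨a, b, rfl⟩
    have hne : ((((d0 :: dt) ++ [lastp]).map String.ofList).length == 1) = false := by
      simp
    rw [hne]
    have hm1 : ((((PySem.Chars.join ['/'] (d0 :: dt)).length : Int) == -1) = false) := by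
      simp
    rw [hm1]
    simp only [Bool.false_eq_true, if_false]
    set J := PySem.Chars.join ['/'] (d0 :: dt) with hJ
    set es := (d0 :: dt).map String.ofList with hes
    have hLsplit : List.map String.ofList (d0 :: dt ++ [lastp]) = es ++ [String.ofList lastp] := by
      simp [hes]
    have hLen : ((List.map String.ofList (d0 :: dt ++ [lastp])).length : Int) - 1
        = ((es.length : Nat) : Int) := by
      simp [hes]
    rw [hLen]
    -- the path component: A's index loop over all but the last piece joins them with '/'
    have hfold :
        (PySem.List.pyRange 0 ((es.length : Nat) : Int)).foldl
          (fun path i =>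
            match path with
            | none => some (PySem.List.pyGetD (List.map String.ofList (d0 :: dt ++ [lastp])) i "")
            | some p => some (p ++ "/" ++ PySem.List.pyGetD (List.map String.ofList (d0 :: dt ++ [lastp])) i ""))
          none = some (String.ofList J) := by
      rw [PySem.List.foldl_congr_mem _ _
        (fun acc j => (fun (path : Option String) (x : String) =>
          match path with
          | none => some x
          | some p => some (p ++ "/" ++ x)) acc (PySem.List.pyGetD es j "")) none ?_]
      · refine (PySem.List.foldl_pyRange_pyGetD' es ""
          (fun (path : Option String) (x : String) =>
            match path with
            | none => some x
            | some p => some (p ++ "/" ++ x)) none (le_refl 0)).trans ?_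
        simp only [Int.toNat_zero, List.drop_zero]
        rw [hes, fold_join (d0 :: dt) (by simp)]
      · intro acc x hx
        have hb := PySem.List.mem_pyRange_one.mp hx
        have hget : PySem.List.pyGetD (List.map String.ofList (d0 :: dt ++ [lastp])) x ""
            = PySem.List.pyGetD es x "" := by
          rw [PySem.List.pyGetD_of_nonneg _ _ hb.1, PySem.List.pyGetD_of_nonneg _ _ hb.1,
            hLsplit, List.getD_append]
          omega
        rw [hget]
    rw [hfold]
    -- the file component
    have hfile : PySem.List.pyGetD (List.map String.ofList (d0 :: dt ++ [lastp]))
        ((es.length : Nat) : Int) "" = String.ofList lastp := by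
      rw [PySem.List.pyGetD_natCast, hLsplit, List.getD_append_right _ _ _ _ (le_refl _)]
      simp
    rw [hfile]
    -- B's slices
    have hslice1 : PySem.Str.slice filename none (some (J.length : Int)) = String.ofList J := by
      rw [PySem.Str.slice]
      simp only [PySem.Chars.slice_eq_listSlice]
      rw [PySem.List.slice_to_natCast, h4, List.take_left]
    have hslice2 : PySem.Str.slice filename (some ((J.length : Int) + 1)) none = String.ofList lastp := by
      rw [PySem.Str.slice]
      simp only [PySem.Chars.slice_eq_listSlice]
      rw [show ((J.length : Int) + 1) = (((J.length + 1 : Nat)) : Int) by push_cast; ring]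
      rw [PySem.List.slice_from_natCast, h4,
        show J ++ '/' :: lastp = (J ++ ['/']) ++ lastp by simp,
        List.drop_left' (by simp)]
    rw [hslice1, hslice2]
  · rw [splitOnP_noslash _ h, rfind_go_noslash _ h]
    simp [String.ofList_toList]
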